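-- pv_equiv track=rewrite | github.com/Wulfic/Cicada3301 | Tools/analyze_titles.py | english_to_runes_index
-- ===== SOURCE A (Python) =====
-- def english_to_runes_index(text):
--     # Mapping English chars to Gematria indices (Approximation)
--     # This is not perfect as 'TH' is one rune, 'NG' is one rune.
--     # We must handle digraphs.
--
--     mapping = {
--         'F':0, 'U':1, 'TH':2, 'O':3, 'R':4, 'C':5, 'K':5, 'G':6, 'W':7,
--         'H':8, 'N':9, 'I':10, 'J':11, 'EO':12, 'P':13, 'X':14, 'S':15, 'Z':15,
--         'T':16, 'B':17, 'E':18, 'M':19, 'L':20, 'NG':21, 'OE':22, 'D':23,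
--         'A':24, 'AE':25, 'Y':26, 'IO':27, 'IA':27, 'EA':28
--     }
--
--     indices = []
--     i = 0
--     text = text.upper()
--     while i < len(text):
--         # Check digraphs
--         if i+1 < len(text) and text[i:i+2] in mapping:
--             indices.append(mapping[text[i:i+2]])
--             i += 2
--         elif text[i] in mapping:
--             indices.append(mapping[text[i]])
--             i += 1
--         else:
--             # Skip unknown or spaces
--             i += 1
--     return indices
-- ===== SOURCE B (Python) =====
-- def english_to_runes_index(text):
--     # One-pass state machine with a pending character instead of index arithmetic
--     # with lookahead: each uppercased char either completes a digraph with the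
--     # pending char or flushes the pending char's single-rune value.
--     DIGRAPHS = {'TH': 2, 'EO': 12, 'NG': 21, 'OE': 22, 'AE': 25, 'IO': 27,
--                 'IA': 27, 'EA': 28}
--     SINGLES = {'F': 0, 'U': 1, 'O': 3, 'R': 4, 'C': 5, 'K': 5, 'G': 6, 'W': 7,
--                'H': 8, 'N': 9, 'I': 10, 'J': 11, 'P': 13, 'X': 14, 'S': 15,
--                'Z': 15, 'T': 16, 'B': 17, 'E': 18, 'M': 19, 'L': 20, 'D': 23,
--                'A': 24, 'Y': 26}
--     out = []
--     pending = None
--     for c in text.upper():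
--         if pending is not None and pending + c in DIGRAPHS:
--             out.append(DIGRAPHS[pending + c])
--             pending = None
--         else:
--             if pending is not None and pending in SINGLES:
--                 out.append(SINGLES[pending])
--             pending = c
--     if pending is not None and pending in SINGLES:
--         out.append(SINGLES[pending])
--     return out
-- ===== Notes on version B (the rewrite author's own statement) =====
-- stated objective: alternative
-- what changed: Replaces A's index-based while loop with explicit two-character lookahead slicing into one combined dict by a single left-to-right fold over the characters that keeps a pending-character state and two split digraph/single lookup tables, emitting a rune index when the pending char completes a digraph or is flushed.
import Mathlib
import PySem

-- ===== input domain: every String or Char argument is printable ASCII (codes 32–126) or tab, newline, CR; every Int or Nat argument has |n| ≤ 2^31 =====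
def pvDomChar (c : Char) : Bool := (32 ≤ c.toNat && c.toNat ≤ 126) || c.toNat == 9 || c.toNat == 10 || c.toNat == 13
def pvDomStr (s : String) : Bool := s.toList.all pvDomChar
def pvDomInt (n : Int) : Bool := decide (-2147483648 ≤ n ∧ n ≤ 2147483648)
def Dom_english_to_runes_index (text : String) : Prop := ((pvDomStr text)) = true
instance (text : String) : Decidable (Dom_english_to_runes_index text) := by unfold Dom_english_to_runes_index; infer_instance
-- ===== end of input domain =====

-- B re-implements A's index/lookahead while-loop as a one-pass pending-character state machine (same return values; purely a structural alternative).

-- ===== PORT A =====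
def pvMapA : PySem.Dict String Int := PySem.Dict.ofList
  [("F",0), ("U",1), ("TH",2), ("O",3), ("R",4), ("C",5), ("K",5), ("G",6), ("W",7),
   ("H",8), ("N",9), ("I",10), ("J",11), ("EO",12), ("P",13), ("X",14), ("S",15), ("Z",15),
   ("T",16), ("B",17), ("E",18), ("M",19), ("L",20), ("NG",21), ("OE",22), ("D",23),
   ("A",24), ("AE",25), ("Y",26), ("IO",27), ("IA",27), ("EA",28)]

-- the while-loop of A, on the uppercased character list, index i
def pvLoopA (U : List Char) (i : Nat) (indices : List Int) : List Int :=
  if h : i < U.length then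
    let two := String.ofList (PySem.List.slice U (some (i : Int)) (some ((i : Int) + (2 : Nat))))
    if i + 1 < U.length ∧ (pvMapA.contains two) then
      pvLoopA U (i + 2) (indices ++ [pvMapA.getD two 0])
    else
      let one := String.ofList [U[i]]
      if pvMapA.contains one then
        pvLoopA U (i + 1) (indices ++ [pvMapA.getD one 0])
      else
        pvLoopA U (i + 1) indices
  else indices
termination_by U.length - i
decreasing_by all_goals omega

def english_to_runes_index (text : String) : List Int :=
  pvLoopA (PySem.Chars.upper text.toList) 0 []

-- ===== PORT B =====
def pvDigraphs : PySem.Dict String Int := PySem.Dict.ofList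
  [("TH",2), ("EO",12), ("NG",21), ("OE",22), ("AE",25), ("IO",27), ("IA",27), ("EA",28)]

def pvSingles : PySem.Dict String Int := PySem.Dict.ofList
  [("F",0), ("U",1), ("O",3), ("R",4), ("C",5), ("K",5), ("G",6), ("W",7), ("H",8),
   ("N",9), ("I",10), ("J",11), ("P",13), ("X",14), ("S",15), ("Z",15), ("T",16),
   ("B",17), ("E",18), ("M",19), ("L",20), ("D",23), ("A",24), ("Y",26)]

-- loop body of B: state = (out, pending)
def pvStepB (st : List Int × Option Char) (c : Char) : List Int × Option Char :=
  match st with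
  | (out, some p) =>
    if pvDigraphs.contains (String.ofList [p, c]) then
      (out ++ [pvDigraphs.getD (String.ofList [p, c]) 0], none)
    else if pvSingles.contains (String.ofList [p]) then
      (out ++ [pvSingles.getD (String.ofList [p]) 0], some c)
    else
      (out, some c)
  | (out, none) => (out, some c)

-- final flush of the pending character
def pvFlushB (st : List Int × Option Char) : List Int :=
  match st with
  | (out, some p) =>
    if pvSingles.contains (String.ofList [p]) then out ++ [pvSingles.getD (String.ofList [p]) 0]
    else out
  | (out, none) => out

def english_to_runes_index_alt (text : String) : List Int :=
  pvFlushB ((PySem.Chars.upper text.toList).foldl pvStepB ([], none))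

-- ===== PRECONDITION & SPEC =====
def Spec_english_to_runes_index (text : String) (out : List Int) : Prop := out = english_to_runes_index_alt text
instance (text : String) (out : List Int) : Decidable (Spec_english_to_runes_index text out) := by unfold Spec_english_to_runes_index; infer_instance

-- ===== CLAIM (what is proved, stated in full; the proofs are below) =====
def Claim_equal_english_to_runes_index : Prop := ∀ (text : String), Dom_english_to_runes_index text → Spec_english_to_runes_index text (english_to_runes_index text)

-- ===== LEMMAS AND PROOFS =====

-- greedy tokenization spec, shared reference of both proofs
def pvG : List Char → List Int
  | [] => []
  | [a] =>
    match pvSingles.get? (String.ofList [a]) with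
    | some v => [v]
    | none => []
  | a :: b :: r =>
    match pvDigraphs.get? (String.ofList [a, b]) with
    | some v => v :: pvG r
    | none =>
      (match pvSingles.get? (String.ofList [a]) with
       | some v => [v]
       | none => []) ++ pvG (b :: r)


theorem pvG_single (a : Char) : pvG [a] =
    (match pvSingles.get? (String.ofList [a]) with
     | some v => [v]
     | none => []) := rfl

theorem pvG_cons_cons (a b : Char) (r : List Char) : pvG (a :: b :: r) =
    (match pvDigraphs.get? (String.ofList [a, b]) with
     | some v => v :: pvG r
     | none =>
       (match pvSingles.get? (String.ofList [a]) with
        | some v => [v]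
        | none => []) ++ pvG (b :: r)) := rfl

theorem pvNe1 (s : String) (hs : s.length ≠ 1) (a : Char) : (s = String.ofList [a]) ↔ False := by
  constructor
  · intro e; apply hs; rw [e]; simp [String.length]
  · exact fun f => f.elim

theorem pvNe2 (s : String) (hs : s.length ≠ 2) (a b : Char) : (s = String.ofList [a, b]) ↔ False := by
  constructor
  · intro e; apply hs; rw [e]; simp [String.length]
  · exact fun f => f.elim

-- A's literal dict, with its keys written as explicit char lists (the same dict)
theorem pvMapA_mk : pvMapA = PySem.Dict.mk
  [(String.ofList ['F'],0), (String.ofList ['U'],1), (String.ofList ['T','H'],2), (String.ofList ['O'],3), (String.ofList ['R'],4),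
   (String.ofList ['C'],5), (String.ofList ['K'],5), (String.ofList ['G'],6), (String.ofList ['W'],7), (String.ofList ['H'],8),
   (String.ofList ['N'],9), (String.ofList ['I'],10), (String.ofList ['J'],11), (String.ofList ['E','O'],12), (String.ofList ['P'],13),
   (String.ofList ['X'],14), (String.ofList ['S'],15), (String.ofList ['Z'],15), (String.ofList ['T'],16), (String.ofList ['B'],17),
   (String.ofList ['E'],18), (String.ofList ['M'],19), (String.ofList ['L'],20), (String.ofList ['N','G'],21), (String.ofList ['O','E'],22),
   (String.ofList ['D'],23), (String.ofList ['A'],24), (String.ofList ['A','E'],25), (String.ofList ['Y'],26), (String.ofList ['I','O'],27),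
   (String.ofList ['I','A'],27), (String.ofList ['E','A'],28)] := by decide

theorem pvDigraphs_mk : pvDigraphs = PySem.Dict.mk
  [(String.ofList ['T','H'],2), (String.ofList ['E','O'],12), (String.ofList ['N','G'],21), (String.ofList ['O','E'],22),
   (String.ofList ['A','E'],25), (String.ofList ['I','O'],27), (String.ofList ['I','A'],27), (String.ofList ['E','A'],28)] := by decide

theorem pvSingles_mk : pvSingles = PySem.Dict.mk
  [(String.ofList ['F'],0), (String.ofList ['U'],1), (String.ofList ['O'],3), (String.ofList ['R'],4), (String.ofList ['C'],5),
   (String.ofList ['K'],5), (String.ofList ['G'],6), (String.ofList ['W'],7), (String.ofList ['H'],8), (String.ofList ['N'],9),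
   (String.ofList ['I'],10), (String.ofList ['J'],11), (String.ofList ['P'],13), (String.ofList ['X'],14), (String.ofList ['S'],15),
   (String.ofList ['Z'],15), (String.ofList ['T'],16), (String.ofList ['B'],17), (String.ofList ['E'],18), (String.ofList ['M'],19),
   (String.ofList ['L'],20), (String.ofList ['D'],23), (String.ofList ['A'],24), (String.ofList ['Y'],26)] := by decide

-- A's combined dict agrees with B's digraph dict on every 2-char key
theorem pvMapA_get2 (a b : Char) : pvMapA.get? (String.ofList [a, b]) = pvDigraphs.get? (String.ofList [a, b]) := by
  rw [pvMapA_mk, pvDigraphs_mk]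
  simp [PySem.Dict.get?_mk_cons, pvNe2 "F" (by decide), pvNe2 "U" (by decide), pvNe2 "O" (by decide), pvNe2 "R" (by decide), pvNe2 "C" (by decide), pvNe2 "K" (by decide), pvNe2 "G" (by decide), pvNe2 "W" (by decide), pvNe2 "H" (by decide), pvNe2 "N" (by decide), pvNe2 "I" (by decide), pvNe2 "J" (by decide), pvNe2 "P" (by decide), pvNe2 "X" (by decide), pvNe2 "S" (by decide), pvNe2 "Z" (by decide), pvNe2 "T" (by decide), pvNe2 "B" (by decide), pvNe2 "E" (by decide), pvNe2 "M" (by decide), pvNe2 "L" (by decide), pvNe2 "D" (by decide), pvNe2 "A" (by decide), pvNe2 "Y" (by decide)]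

-- A's combined dict agrees with B's singles dict on every 1-char key
theorem pvMapA_get1 (a : Char) : pvMapA.get? (String.ofList [a]) = pvSingles.get? (String.ofList [a]) := by
  rw [pvMapA_mk, pvSingles_mk]
  simp [PySem.Dict.get?_mk_cons, pvNe1 "TH" (by decide), pvNe1 "EO" (by decide), pvNe1 "NG" (by decide), pvNe1 "OE" (by decide), pvNe1 "AE" (by decide), pvNe1 "IO" (by decide), pvNe1 "IA" (by decide), pvNe1 "EA" (by decide)]

set_option maxRecDepth 8192 in
theorem pvLoopA_eq_g : ∀ (n : Nat) (U : List Char) (i : Nat) (acc : List Int),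
    U.length - i = n → pvLoopA U i acc = acc ++ pvG (U.drop i) := by
  intro n
  induction n using Nat.strong_induction_on with
  | _ n ih =>
    intro U i acc hn
    rw [pvLoopA]
    by_cases h : i < U.length
    · simp only [h, dif_pos]
      have hdrop : U.drop i = U[i] :: U.drop (i + 1) := List.drop_eq_getElem_cons h
      have hget1 := pvMapA_get1 U[i]
      rw [PySem.Dict.contains_eq_isSome_get?, PySem.Dict.contains_eq_isSome_get?]
      by_cases h2 : i + 1 < U.length
      · have hdrop2 : U.drop (i + 1) = U[i + 1] :: U.drop (i + 2) := List.drop_eq_getElem_cons h2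
        have hslice : PySem.List.slice U (some (i : Int)) (some ((i : Int) + ((2 : Nat) : Int))) = [U[i], U[i + 1]] := by
          rw [PySem.List.slice_natCast_add, hdrop, hdrop2]
          rfl
        rw [hslice]
        have hget2 := pvMapA_get2 U[i] U[i + 1]
        cases hd : pvDigraphs.get? (String.ofList [U[i], U[i + 1]]) with
        | some v =>
          rw [if_pos ⟨h2, by rw [hget2, hd]; rfl⟩]
          rw [ih (U.length - (i + 2)) (by omega) U (i + 2) _ rfl]
          rw [PySem.Dict.getD_eq_get?_getD, hget2, hd, hdrop, hdrop2, pvG_cons_cons, hd]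
          simp
        | none =>
          rw [if_neg (by rintro ⟨-, hc⟩; rw [hget2, hd] at hc; exact Bool.false_ne_true hc)]
          cases hs : pvSingles.get? (String.ofList [U[i]]) with
          | some w =>
            rw [if_pos (by rw [hget1, hs]; rfl)]
            rw [ih (U.length - (i + 1)) (by omega) U (i + 1) _ rfl]
            rw [PySem.Dict.getD_eq_get?_getD, hget1, hs, hdrop, hdrop2, pvG_cons_cons, hd, hs]
            simp
          | none =>
            rw [if_neg (by rw [hget1, hs]; exact Bool.false_ne_true)]
            rw [ih (U.length - (i + 1)) (by omega) U (i + 1) _ rfl]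
            rw [hdrop, hdrop2, pvG_cons_cons, hd, hs]
            simp
      · rw [if_neg (by rintro ⟨hlt, -⟩; exact h2 hlt)]
        have hnil : U.drop (i + 1) = [] := List.drop_eq_nil_of_le (by omega)
        cases hs : pvSingles.get? (String.ofList [U[i]]) with
        | some w =>
          rw [if_pos (by rw [hget1, hs]; rfl)]
          rw [ih (U.length - (i + 1)) (by omega) U (i + 1) _ rfl]
          rw [PySem.Dict.getD_eq_get?_getD, hget1, hs, hdrop, hnil, pvG_single, hs]
          simp [pvG]
        | none =>
          rw [if_neg (by rw [hget1, hs]; exact Bool.false_ne_true)]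
          rw [ih (U.length - (i + 1)) (by omega) U (i + 1) _ rfl]
          rw [hdrop, hnil, pvG_single, hs]
          simp [pvG]
    · rw [dif_neg h]
      rw [List.drop_eq_nil_of_le (by omega)]
      simp [pvG]

theorem pvFoldB_both (rest : List Char) :
    (∀ acc, pvFlushB (rest.foldl pvStepB (acc, none)) = acc ++ pvG rest) ∧
    (∀ acc p, pvFlushB (rest.foldl pvStepB (acc, some p)) = acc ++ pvG (p :: rest)) := by
  induction rest with
  | nil =>
    refine ⟨fun acc => by simp [pvFlushB, pvG], fun acc p => ?_⟩
    simp only [List.foldl_nil, pvFlushB, pvG]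
    rw [PySem.Dict.contains_eq_isSome_get?]
    cases hs : pvSingles.get? (String.ofList [p]) with
    | some w => simp [PySem.Dict.getD_eq_get?_getD, hs]
    | none => simp
  | cons c r ih =>
    have hsome : ∀ acc p, pvFlushB ((c :: r).foldl pvStepB (acc, some p)) = acc ++ pvG (p :: c :: r) := by
      intro acc p
      rw [List.foldl_cons]
      show pvFlushB (r.foldl pvStepB (pvStepB (acc, some p) c)) = _
      rw [pvStepB]
      rw [PySem.Dict.contains_eq_isSome_get?, PySem.Dict.contains_eq_isSome_get?]
      cases hd : pvDigraphs.get? (String.ofList [p, c]) with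
      | some v =>
        rw [if_pos (by simp)]
        rw [ih.1]
        rw [PySem.Dict.getD_eq_get?_getD, hd, pvG_cons_cons, hd]
        simp
      | none =>
        rw [if_neg (by simp)]
        cases hs : pvSingles.get? (String.ofList [p]) with
        | some w =>
          rw [if_pos (by simp)]
          rw [ih.2]
          rw [PySem.Dict.getD_eq_get?_getD, hs, pvG_cons_cons, hd, hs]
          simp
        | none =>
          rw [if_neg (by simp)]
          rw [ih.2]
          rw [pvG_cons_cons, hd, hs]
          simp
    refine ⟨fun acc => ?_, hsome⟩
    rw [List.foldl_cons]
    show pvFlushB (r.foldl pvStepB (acc, some c)) = _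
    exact ih.2 acc c

-- ===== VERDICT (by name: the statement is the Claim_ definition above) =====
theorem english_to_runes_index_spec : Claim_equal_english_to_runes_index := by
  intro text _
  unfold Spec_english_to_runes_index english_to_runes_index english_to_runes_index_alt
  rw [pvLoopA_eq_g (PySem.Chars.upper text.toList).length _ 0 [] (by omega),
      (pvFoldB_both _).1]
  simp
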